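-- pv_equiv track=rewrite | github.com/gabrielmaillard/France-IOI | Niveau 3/3 - Tableaux avancés/Carré magique.py | magical_shape
-- ===== SOURCE A (Python) =====
-- def magical_shape(square):
--     num_already_used = set()
--     for row in square:
--         for column in row:
--             if 1 <= column <= len(square) ** 2 and column not in num_already_used:
--                 num_already_used.add(column)
--             else:
--                 return False
--     return True
-- ===== SOURCE B (Python) =====
-- def magical_shape(square):
--     values = sorted(v for row in square for v in row)
--     if not values:
--         return True
--     n2 = len(square) ** 2
--     return (values[0] >= 1 and values[-1] <= n2
--             and all(a < b for a, b in zip(values, values[1:])))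
-- ===== Notes on version B (the rewrite author's own statement) =====
-- stated objective: alternative
-- what changed: Replaces A's incremental hash-set pass with early return by sort-then-scan: sort all cell values, check the range via the sorted list's first and last elements, and detect duplicates by a strict-increase scan over adjacent pairs (no set at all).
import Mathlib
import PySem

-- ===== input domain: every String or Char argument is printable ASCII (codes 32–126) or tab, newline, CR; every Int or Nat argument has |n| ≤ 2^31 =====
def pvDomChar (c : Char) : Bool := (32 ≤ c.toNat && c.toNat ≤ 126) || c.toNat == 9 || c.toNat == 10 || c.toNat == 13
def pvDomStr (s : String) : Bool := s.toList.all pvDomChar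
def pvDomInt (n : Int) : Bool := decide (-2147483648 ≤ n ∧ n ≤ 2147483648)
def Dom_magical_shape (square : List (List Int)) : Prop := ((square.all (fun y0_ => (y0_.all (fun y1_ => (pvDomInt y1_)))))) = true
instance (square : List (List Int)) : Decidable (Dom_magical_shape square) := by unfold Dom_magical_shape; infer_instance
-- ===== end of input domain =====

-- B replaces A's incremental-set pass with early return by sort-then-scan:
-- sort all cell values, check the range via first/last of the sorted list,
-- and detect duplicates by a strict-increase scan over adjacent pairs
-- (no set at all); objective: alternative.


-- ===== PORT A =====
-- inner 'for column in row' loop: returns the updated set, or none on early 'return False'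
def msCols (n2 : Int) (used : PySem.Set Int) : List Int → Option (PySem.Set Int)
  | [] => some used
  | c :: cs =>
      if (decide (1 ≤ c) && decide (c ≤ n2)) && !(PySem.Set.contains used c) then
        msCols n2 (PySem.Set.add used c) cs
      else none

-- outer 'for row in square' loop
def msRows (n2 : Int) (used : PySem.Set Int) : List (List Int) → Bool
  | [] => true
  | r :: rs =>
      match msCols n2 used r with
      | none => false
      | some u => msRows n2 u rs

def magical_shape (square : List (List Int)) : Bool :=
  msRows ((square.length : Int) ^ 2) PySem.Set.empty square

-- ===== PORT B =====
def magical_shape_alt (square : List (List Int)) : Bool :=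
  let values := PySem.List.sorted (square.flatMap (fun row => row)) (fun v => v) false
  match values with
  | [] => true
  | v :: vs =>
      let n2 := (square.length : Int) ^ 2
      decide (1 ≤ v) && decide ((v :: vs).getLast (by simp) ≤ n2) &&
        (((v :: vs).zip vs).all fun p => decide (p.1 < p.2))

-- ===== PRECONDITION & SPEC =====
def Spec_magical_shape (square : List (List Int)) (out : Bool) : Prop := out = magical_shape_alt square
instance (square : List (List Int)) (out : Bool) : Decidable (Spec_magical_shape square out) := by unfold Spec_magical_shape; infer_instance

-- ===== CLAIM (what is proved, stated in full; the proofs are below) =====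
def Claim_equal_magical_shape : Prop := ∀ (square : List (List Int)), Dom_magical_shape square → Spec_magical_shape square (magical_shape square)

-- ===== LEMMAS AND PROOFS =====

theorem msCols_append (n2 : Int) (used : PySem.Set Int) (a b : List Int) :
    msCols n2 used (a ++ b) = (msCols n2 used a).bind (fun u => msCols n2 u b) := by
  induction a generalizing used with
  | nil => simp [msCols]
  | cons c cs ih =>
      simp only [List.cons_append, msCols]
      split_ifs <;> simp [ih]

theorem msRows_eq (n2 : Int) (used : PySem.Set Int) (rows : List (List Int)) :
    msRows n2 used rows = (msCols n2 used (rows.flatMap (fun r => r))).isSome := by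
  induction rows generalizing used with
  | nil => simp [msRows, msCols]
  | cons r rs ih =>
      simp only [List.flatMap_cons, msRows, msCols_append]
      cases h : msCols n2 used r <;> simp [ih]

theorem msCols_isSome (n2 : Int) (used : PySem.Set Int) (vs : List Int) :
    (msCols n2 used vs).isSome =
      ((vs.all fun v => decide (1 ≤ v) && decide (v ≤ n2)) &&
        (decide vs.Nodup && decide (∀ v ∈ vs, v ∉ used))) := by
  induction vs generalizing used with
  | nil => simp [msCols]
  | cons c cs ih =>
      simp only [msCols]
      by_cases hcond : ((decide (1 ≤ c) && decide (c ≤ n2)) && !(PySem.Set.contains used c)) = true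
      · rw [if_pos hcond, ih]
        simp only [Bool.and_eq_true, decide_eq_true_eq, Bool.not_eq_true',
          PySem.Set.contains_eq_listContains, List.contains_eq_mem,
          decide_eq_false_iff_not] at hcond
        obtain ⟨⟨h1, h2⟩, hcu⟩ := hcond
        simp only [List.all_cons, List.nodup_cons, List.mem_cons, h1, h2, decide_true,
          Bool.true_and]
        rw [Bool.eq_iff_iff]
        simp only [Bool.and_eq_true, decide_eq_true_eq, PySem.Set.mem_add]
        constructor
        · rintro ⟨ha, hnd, hall⟩
          refine ⟨ha, ⟨fun hc => hall c hc (Or.inr rfl), hnd⟩, ?_⟩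
          intro v hv
          rcases List.mem_cons.mp hv with rfl | hv'
          · exact hcu
          · exact fun hm => hall v hv' (Or.inl hm)
        · rintro ⟨ha, ⟨hc, hnd⟩, hall⟩
          refine ⟨ha, hnd, fun v hv h => ?_⟩
          rcases h with hm | rfl
          · exact hall v (List.mem_cons_of_mem _ hv) hm
          · exact hc hv
      · rw [if_neg hcond]
        simp only [Bool.and_eq_true, decide_eq_true_eq, Bool.not_eq_true',
          PySem.Set.contains_eq_listContains, List.contains_eq_mem,
          decide_eq_false_iff_not, not_and] at hcond
        rw [Bool.eq_iff_iff]
        simp only [Option.isSome_none, Bool.false_eq_true, false_iff, Bool.and_eq_true,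
          decide_eq_true_eq, List.all_cons, List.nodup_cons, List.mem_cons]
        rintro ⟨⟨⟨hr1, hr2⟩, -⟩, -, hall⟩
        exact hcond ⟨hr1, hr2⟩ (hall c (Or.inl rfl))

-- on a weakly sorted list, the strict adjacent-pair scan detects exactly the duplicates
theorem allzip_iff_nodup : ∀ (l : List Int), l.Pairwise (· ≤ ·) →
    (((l.zip l.tail).all fun p => decide (p.1 < p.2)) = true ↔ l.Nodup)
  | [], _ => by simp
  | [a], _ => by simp
  | a :: b :: t, h => by
      have hp' : (b :: t).Pairwise (· ≤ ·) := (List.pairwise_cons.mp h).2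
      have ih := allzip_iff_nodup (b :: t) hp'
      simp only [List.tail_cons, List.zip_cons_cons, List.all_cons, Bool.and_eq_true,
        decide_eq_true_eq, List.nodup_cons] at *
      constructor
      · rintro ⟨hab, hrest⟩
        refine ⟨?_, ih.mp hrest⟩
        intro hmem
        rcases List.mem_cons.mp hmem with rfl | hm
        · exact lt_irrefl a hab
        · exact absurd (lt_of_lt_of_le hab ((List.pairwise_cons.mp hp').1 a hm))
            (lt_irrefl a)
      · rintro ⟨hnmem, hnd⟩
        have h1 : a ≤ b := (List.pairwise_cons.mp h).1 b (by simp)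
        exact ⟨lt_of_le_of_ne h1 (fun he => hnmem (he ▸ List.mem_cons_self)), ih.mpr hnd⟩

-- on a weakly sorted list, elements are ≤ the last element
theorem le_getLast (l : List Int) (h : l.Pairwise (· ≤ ·)) (hne : l ≠ []) :
    ∀ y ∈ l, y ≤ l.getLast hne := by
  induction l with
  | nil => simp at hne
  | cons a t ih =>
      intro y hy
      rcases List.mem_cons.mp hy with rfl | hy'
      · cases t with
        | nil => simp
        | cons b t' =>
            rw [List.getLast_cons (by simp)]
            have := (List.pairwise_cons.mp h).1
            exact this _ (List.getLast_mem _)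
      · cases t with
        | nil => simp at hy'
        | cons b t' =>
            rw [List.getLast_cons (by simp)]
            exact ih (List.pairwise_cons.mp h).2 (by simp) y hy'

-- A's value in closed form: all cells in range and no duplicates
theorem magical_shape_eq (square : List (List Int)) :
    magical_shape square =
      (((square.flatMap (fun r => r)).all fun v =>
          decide (1 ≤ v) && decide (v ≤ (square.length : Int) ^ 2)) &&
        decide (square.flatMap (fun r => r)).Nodup) := by
  unfold magical_shape
  rw [msRows_eq, msCols_isSome]
  simp [PySem.Set.empty]

-- ===== VERDICT (by name: the statement is the Claim_ definition above) =====
theorem magical_shape_spec : Claim_equal_magical_shape := by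
  intro square _
  unfold Spec_magical_shape magical_shape_alt
  rw [magical_shape_eq]
  set values := square.flatMap (fun r => r) with hvdef
  have hperm : (PySem.List.sorted values (fun v => v) false).Perm values :=
    PySem.List.sorted_perm values (fun v => v) false
  have hpw : (PySem.List.sorted values (fun v => v) false).Pairwise (fun a b => a ≤ b) :=
    PySem.List.sorted_pairwise values (fun v => v)
  cases hs : PySem.List.sorted values (fun v => v) false with
  | nil =>
      have : values = [] := by
        rw [hs] at hperm
        exact hperm.symm.eq_nil
      simp [this]
  | cons v vs =>
      rw [hs] at hperm hpw
      show _ = (decide (1 ≤ v) && decide ((v :: vs).getLast (by simp) ≤ ((square.length : Int)) ^ 2) &&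
        (((v :: vs).zip vs).all fun p => decide (p.1 < p.2)))
      rw [Bool.eq_iff_iff]
      simp only [Bool.and_eq_true, decide_eq_true_eq, List.all_eq_true]
      have hzip := allzip_iff_nodup (v :: vs) hpw
      simp only [List.tail_cons, List.all_eq_true, decide_eq_true_eq] at hzip
      rw [hzip]
      have hndiff : (v :: vs).Nodup ↔ values.Nodup := hperm.nodup_iff
      have hhead : ∀ y ∈ values, v ≤ y := by
        intro y hy
        have hy' : y ∈ (v :: vs) := hperm.mem_iff.mpr hy
        rcases List.mem_cons.mp hy' with rfl | hy''
        · exact le_refl _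
        · exact (List.pairwise_cons.mp hpw).1 y hy''
      have hlast := le_getLast (v :: vs) hpw (by simp)
      constructor
      · rintro ⟨hall, hnd⟩
        have hv : v ∈ values := hperm.mem_iff.mp (by simp)
        have hl : (v :: vs).getLast (by simp) ∈ values :=
          hperm.mem_iff.mp (List.getLast_mem _)
        exact ⟨⟨(hall v hv).1, (hall _ hl).2⟩, hndiff.mpr hnd⟩
      · rintro ⟨⟨h1, h2⟩, hnd⟩
        refine ⟨fun x hx => ⟨le_trans h1 (hhead x hx), ?_⟩, hndiff.mp hnd⟩
        exact le_trans (hlast x (hperm.mem_iff.mpr hx)) h2
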